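-- pv_equiv track=rewrite | github.com/KCourtney1/Code | python/compsci131/HW4.py | next_double
-- ===== SOURCE A (Python) =====
-- def next_double(lst):
--     """
--         precondition: lst is a list of numbers
--         postcondition: returns an integer that represents the number of elements that are followed by their double in lst. non-destructive
--         >>> next_double([1,2,4,8,16,32,64,128,256])
--         8
--         >>> next_double([1,3,4,2,32,8,128,-5,6])
--         0
--         >>> next_double([1,0,0,-5,-10,32,64,128,2,9,18])
--         5
--         >>> next_double([1,2])
--         1
--         >>> next_double([1])
--         0
--     """
--     if len(lst) == 1:
--         return 0
--     elif len(lst)==2: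
--         if lst[0]*2 == lst[1]:
--             return 1
--         else:
--             return 0
--     else:
--         if lst[0]*2 == lst[1]:
--             return 1+next_double(lst[1:])
--         else:
--             return 0+next_double(lst[1:])
-- ===== SOURCE B (Python) =====
-- def next_double(lst):
--     return sum(1 for a, b in zip(lst, lst[1:]) if a * 2 == b)
-- ===== Notes on version B (the rewrite author's own statement) =====
-- stated objective: faster
-- what changed: Replaces A's recursion that re-slices the list at every step (lst[1:] copies, O(n^2) total) with one linear pass over zipped adjacent pairs.
import Mathlib
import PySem

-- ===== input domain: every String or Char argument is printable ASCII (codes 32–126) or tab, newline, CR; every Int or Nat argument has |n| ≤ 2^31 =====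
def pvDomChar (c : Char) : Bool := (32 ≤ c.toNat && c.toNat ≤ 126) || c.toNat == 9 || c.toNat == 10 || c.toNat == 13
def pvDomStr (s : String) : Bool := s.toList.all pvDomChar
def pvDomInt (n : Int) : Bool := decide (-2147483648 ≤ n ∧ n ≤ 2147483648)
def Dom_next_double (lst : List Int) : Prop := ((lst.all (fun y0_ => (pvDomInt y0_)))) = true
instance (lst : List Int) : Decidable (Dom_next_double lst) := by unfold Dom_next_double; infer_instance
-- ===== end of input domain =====

-- B replaces A's recursion over repeatedly sliced copies of the list with one
-- linear fold over the zipped adjacent pairs (objective: faster).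


-- ===== PORT A =====
-- Literal transliteration of A's recursion: length-1 and length-2 branches, then
-- compare lst[0]*2 with lst[1] and recurse on lst[1:].  On [] Python falls into the
-- last branch and lst[0] raises IndexError; that input is excluded by Pre_.
def next_double : List Int → Int
  | [] => 0            -- Python raises IndexError here (outside Pre_)
  | [_] => 0
  | [a, b] => if a * 2 = b then 1 else 0
  | a :: b :: rest =>
      (if a * 2 = b then 1 else 0) + next_double (b :: rest)

-- ===== PORT B =====
def next_double_alt (lst : List Int) : Int :=
  ((lst.zip (PySem.List.slice lst (some 1) none)).foldl
    (fun acc p => if p.1 * 2 = p.2 then acc + 1 else acc) 0)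

-- ===== PRECONDITION & SPEC =====
-- Pre_ excludes only the empty list, on which A raises IndexError (its last branch reads lst[0]).
def Pre_next_double (lst : List Int) : Prop := lst ≠ []
instance (lst : List Int) : Decidable (Pre_next_double lst) := by unfold Pre_next_double; infer_instance
def pvWitness_next_double : List Int := [1, 2, 4]

def Spec_next_double (lst : List Int) (out : Int) : Prop := out = next_double_alt lst
instance (lst : List Int) (out : Int) : Decidable (Spec_next_double lst out) := by unfold Spec_next_double; infer_instance

-- ===== CLAIM (what is proved, stated in full; the proofs are below) =====
def Claim_equal_next_double : Prop := ∀ (lst : List Int), Dom_next_double lst → Pre_next_double lst → Spec_next_double lst (next_double lst)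

-- ===== LEMMAS AND PROOFS =====

-- shifting the counting fold's accumulator
theorem foldl_count_shift (l : List (Int × Int)) (n : Int) :
    l.foldl (fun acc p => if p.1 * 2 = p.2 then acc + 1 else acc) n
      = n + l.foldl (fun acc p => if p.1 * 2 = p.2 then acc + 1 else acc) 0 := by
  induction l generalizing n with
  | nil => simp
  | cons h t ih =>
      simp only [List.foldl_cons]
      rw [ih, ih (if h.1 * 2 = h.2 then 0 + 1 else 0)]
      split_ifs <;> ring

-- B's slice is the tail, so B satisfies A's recurrence
theorem alt_cons (a b : Int) (rest : List Int) :
    next_double_alt (a :: b :: rest)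
      = (if a * 2 = b then 1 else 0) + next_double_alt (b :: rest) := by
  unfold next_double_alt
  rw [PySem.List.slice_from_one, PySem.List.slice_from_one]
  simp only [List.tail_cons, List.zip_cons_cons, List.foldl_cons]
  rw [foldl_count_shift]
  split_ifs <;> ring

theorem next_double_eq_alt (lst : List Int) (h : lst ≠ []) :
    next_double lst = next_double_alt lst := by
  match lst with
  | [] => exact absurd rfl h
  | [a] => simp [next_double, next_double_alt, PySem.List.slice_from_one]
  | [a, b] =>
      simp only [next_double, alt_cons]
      have : next_double_alt [b] = 0 := by simp [next_double_alt, PySem.List.slice_from_one]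
      rw [this]; split_ifs <;> ring
  | a :: b :: c :: rest =>
      have ih := next_double_eq_alt (b :: c :: rest) (by simp)
      simp only [next_double, alt_cons, ih]

-- ===== VERDICT (by name: the statement is the Claim_ definition above) =====
theorem next_double_spec : Claim_equal_next_double := by
  intro lst _ hpre
  unfold Spec_next_double
  exact next_double_eq_alt lst hpre
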